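-- pv_equiv track=rewrite | github.com/pypi-data/pypi-mirror-99 | packages/portmod/portmod-2.0rc7-cp39-cp39-win_amd64.whl/portmod/query.py | get_maintainer_string
-- ===== SOURCE A (Python) =====
-- from typing import (
--     AbstractSet,
--     Any,
--     DefaultDict,
--     Dict,
--     Generator,
--     Iterable,
--     List,
--     Optional,
--     Tuple,
--     Union,
-- )
--
-- def get_maintainer_string(maintainers: Union[List[Any], Any]) -> str:
--     def list_maintainers_to_human_strings(maintainers: List[Any]) -> str:
--         """ return the list of maintainers as a human readible string """
--         result = ""
--         for maintainer_id in range(len(maintainers)):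
--             maintainer = str(maintainers[maintainer_id])
--             if maintainer_id >= len(maintainers) - 1:  # the last
--                 result += maintainer
--             elif maintainer_id >= len(maintainers) - 2:  # the second last
--                 result += maintainer + " and "
--             else:
--                 result += maintainer + ", "
--         return result
--
--     if not isinstance(maintainers, list):
--         maintainers = [maintainers]
--
--     return list_maintainers_to_human_strings(maintainers)
-- ===== SOURCE B (Python) =====
-- def get_maintainer_string(maintainers):
--     if not isinstance(maintainers, list):
--         maintainers = [maintainers]
--     if not maintainers:
--         return ""
--     if len(maintainers) == 1:
--         return str(maintainers[0])
--     return ", ".join(str(x) for x in maintainers[:-1]) + " and " + str(maintainers[-1])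
-- ===== Notes on version B (the rewrite author's own statement) =====
-- stated objective: simpler
-- what changed: Replaces the per-index loop with a three-way per-element separator branch by a cardinality split: empty -> "", singleton -> its element, otherwise a ', '-join of the prefix plus ' and ' plus the last element.
import Mathlib
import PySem

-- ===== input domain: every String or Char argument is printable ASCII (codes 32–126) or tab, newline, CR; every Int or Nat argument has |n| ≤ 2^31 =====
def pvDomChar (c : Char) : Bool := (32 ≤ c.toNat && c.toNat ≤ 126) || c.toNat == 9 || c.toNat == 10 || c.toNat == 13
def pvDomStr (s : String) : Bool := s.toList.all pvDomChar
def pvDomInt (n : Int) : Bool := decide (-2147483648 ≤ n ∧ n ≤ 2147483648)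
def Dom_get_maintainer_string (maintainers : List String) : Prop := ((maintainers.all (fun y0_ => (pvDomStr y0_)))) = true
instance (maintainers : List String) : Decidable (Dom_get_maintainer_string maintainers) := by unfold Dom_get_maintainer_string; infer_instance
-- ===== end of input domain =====

-- B replaces A's per-index loop (three-way separator branch per element) by a cardinality split:
-- "" / single element / ", "-join of the prefix ++ " and " ++ last element. Objective: simpler.


-- ===== PORT A =====
-- A: result = ""; for maintainer_id in range(len(maintainers)): three-way branch on the index.
-- (the isinstance-normalisation is vacuous at type List String; str(x) on a str is x itself)
def get_maintainer_string (maintainers : List String) : String :=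
  (PySem.List.pyRange 0 (maintainers.length : Int) 1).foldl
    (fun result maintainer_id =>
      let maintainer := PySem.List.pyGetD maintainers maintainer_id ""
      if maintainer_id ≥ (maintainers.length : Int) - 1 then result ++ maintainer
      else if maintainer_id ≥ (maintainers.length : Int) - 2 then result ++ (maintainer ++ " and ")
      else result ++ (maintainer ++ ", ")) ""

-- ===== PORT B =====
-- B: branch on the length; ", ".join over maintainers[:-1] (dropLast), then " and " and the last element.
def get_maintainer_string_alt (maintainers : List String) : String :=
  match maintainers with
  | [] => ""
  | [x] => x
  | x :: y :: rest =>
      PySem.Str.join ", " ((x :: y :: rest).dropLast) ++ " and " ++ rest.getLastD y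

-- ===== PRECONDITION & SPEC =====
def Spec_get_maintainer_string (maintainers : List String) (out : String) : Prop := out = get_maintainer_string_alt maintainers
instance (maintainers : List String) (out : String) : Decidable (Spec_get_maintainer_string maintainers out) := by unfold Spec_get_maintainer_string; infer_instance

-- ===== CLAIM (what is proved, stated in full; the proofs are below) =====
def Claim_equal_get_maintainer_string : Prop := ∀ (maintainers : List String), Dom_get_maintainer_string maintainers → Spec_get_maintainer_string maintainers (get_maintainer_string maintainers)

-- ===== LEMMAS AND PROOFS =====

-- the string A's loop appends at (Nat) index k
def pvPiece (xs : List String) (k : Nat) : String :=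
  if (k : Int) ≥ (xs.length : Int) - 1 then xs.getD k ""
  else if (k : Int) ≥ (xs.length : Int) - 2 then xs.getD k "" ++ " and "
  else xs.getD k "" ++ ", "

-- plain right-fold concatenation of a list of strings
def pvCat (l : List String) : String := l.foldr (· ++ ·) ""

lemma pvFoldA (xs : List String) (l : List Nat) (acc : String) :
    (List.map (fun (k : Nat) => (k : Int)) l).foldl
      (fun result maintainer_id =>
        let maintainer := PySem.List.pyGetD xs maintainer_id ""
        if maintainer_id ≥ (xs.length : Int) - 1 then result ++ maintainer
        else if maintainer_id ≥ (xs.length : Int) - 2 then result ++ (maintainer ++ " and ")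
        else result ++ (maintainer ++ ", ")) acc
    = acc ++ pvCat (l.map (pvPiece xs)) := by
  induction l generalizing acc with
  | nil => simp [pvCat]
  | cons k l ih =>
      rw [List.map_cons, List.foldl_cons, ih]
      simp only [pvCat, List.map_cons, List.foldr_cons, pvPiece, PySem.List.pyGetD_natCast]
      split_ifs <;> simp [String.append_assoc]

lemma pvStrJoin_singleton (sep p : String) : PySem.Str.join sep [p] = p := by
  apply String.toList_inj.mp
  simp [PySem.Str.join, PySem.Chars.join_singleton]

lemma pvStrJoin_cons_cons (sep p q : String) (rest : List String) :
    PySem.Str.join sep (p :: q :: rest) = p ++ sep ++ PySem.Str.join sep (q :: rest) := by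
  apply String.toList_inj.mp
  simp [PySem.Str.join, PySem.Chars.join_cons_cons, String.toList_append]

lemma pvAlt_cons (x y z : String) (r : List String) :
    get_maintainer_string_alt (x :: y :: z :: r)
      = x ++ ", " ++ get_maintainer_string_alt (y :: z :: r) := by
  simp only [get_maintainer_string_alt, List.dropLast_cons₂, List.getLastD_cons]
  rw [pvStrJoin_cons_cons]
  simp [String.append_assoc]

lemma pvPiece_succ (x : String) (t : List String) (k : Nat) :
    pvPiece (x :: t) (k + 1) = pvPiece t k := by
  simp only [pvPiece, List.getD_cons_succ, List.length_cons]
  have h1 : (((k + 1 : Nat)) : Int) ≥ ((t.length + 1 : Nat) : Int) - 1 ↔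
      ((k : Nat) : Int) ≥ ((t.length : Nat) : Int) - 1 := by push_cast; omega
  have h2 : (((k + 1 : Nat)) : Int) ≥ ((t.length + 1 : Nat) : Int) - 2 ↔
      ((k : Nat) : Int) ≥ ((t.length : Nat) : Int) - 2 := by push_cast; omega
  rw [if_congr h1 rfl (if_congr h2 rfl rfl)]

lemma pvMain (xs : List String) :
    pvCat ((List.range xs.length).map (pvPiece xs)) = get_maintainer_string_alt xs := by
  induction xs with
  | nil => simp [pvCat, get_maintainer_string_alt]
  | cons x t ih =>
      cases t with
      | nil => simp [pvCat, pvPiece, get_maintainer_string_alt, List.range_succ]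
      | cons y rest =>
          rw [List.length_cons, List.range_succ_eq_map, List.map_cons, List.map_map]
          have hshift : ((List.range (y :: rest).length).map ((pvPiece (x :: y :: rest)) ∘ Nat.succ))
              = (List.range (y :: rest).length).map (pvPiece (y :: rest)) :=
            List.map_congr_left (fun k _ => pvPiece_succ x (y :: rest) k)
          rw [hshift]
          have hcat : pvCat (pvPiece (x :: y :: rest) 0 ::
              (List.range (y :: rest).length).map (pvPiece (y :: rest)))
              = pvPiece (x :: y :: rest) 0 ++ get_maintainer_string_alt (y :: rest) := by
            simp only [pvCat, List.foldr_cons]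
            rw [show ((List.range (y :: rest).length).map (pvPiece (y :: rest))).foldr (· ++ ·) ""
                = pvCat ((List.range (y :: rest).length).map (pvPiece (y :: rest))) from rfl, ih]
          rw [hcat]
          cases rest with
          | nil =>
              have hp0 : pvPiece (x :: [y]) 0 = x ++ " and " := by
                simp only [pvPiece, List.length_cons, List.length_nil]
                rw [if_neg (by decide), if_pos (by decide)]
                rfl
              rw [hp0]
              simp [get_maintainer_string_alt, pvStrJoin_singleton, String.append_assoc]
          | cons z r =>
              have hp0 : pvPiece (x :: y :: z :: r) 0 = x ++ ", " := by
                simp only [pvPiece, List.length_cons]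
                rw [if_neg (by push_cast; omega), if_neg (by push_cast; omega)]
                rfl
              rw [hp0, pvAlt_cons]

-- ===== VERDICT (by name: the statement is the Claim_ definition above) =====
theorem get_maintainer_string_spec : Claim_equal_get_maintainer_string := by
  intro maintainers _
  unfold Spec_get_maintainer_string get_maintainer_string
  rw [PySem.List.pyRange_zero_nat, pvFoldA]
  simpa using pvMain maintainers
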